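-- pv_equiv track=rewrite | github.com/ObuchiYuki/xcllmtool | translator.py | parse_translation_content
-- ===== SOURCE A (Python) =====
-- def parse_translation_content(content: str) -> list[str]:
--     if content.startswith("```"):
--         content = content[3:]
--     if content.endswith("```"):
--         content = content[:-3]
--
--     content = content.strip()
--     content = "\n" + content + "\n"
--
--     translations = content.split("\n- ")
--
--     return [translation.strip() for translation in translations if translation.strip() != ""]
-- ===== SOURCE B (Python) =====
-- def parse_translation_content(content: str) -> list[str]:
--     if content.startswith("```"):
--         content = content[3:]
--     if content.endswith("```"):
--         content = content[:-3]
--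
--     content = content.strip()
--
--     results = []
--     current = ""
--     for line in content.split("\n"):
--         if line.startswith("- "):
--             results.append(current)
--             current = line[2:]
--         else:
--             current = current + "\n" + line
--     results.append(current)
--
--     return [part.strip() for part in results if part.strip() != ""]
-- ===== Notes on version B (the rewrite author's own statement) =====
-- stated objective: alternative
-- what changed: Replaces A's split on the three-character delimiter (newline, dash, space) around two sentinel newlines by a single fold over the lines of the stripped content that accumulates the current item and starts a new one at each line beginning with dash-space.
import Mathlib
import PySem

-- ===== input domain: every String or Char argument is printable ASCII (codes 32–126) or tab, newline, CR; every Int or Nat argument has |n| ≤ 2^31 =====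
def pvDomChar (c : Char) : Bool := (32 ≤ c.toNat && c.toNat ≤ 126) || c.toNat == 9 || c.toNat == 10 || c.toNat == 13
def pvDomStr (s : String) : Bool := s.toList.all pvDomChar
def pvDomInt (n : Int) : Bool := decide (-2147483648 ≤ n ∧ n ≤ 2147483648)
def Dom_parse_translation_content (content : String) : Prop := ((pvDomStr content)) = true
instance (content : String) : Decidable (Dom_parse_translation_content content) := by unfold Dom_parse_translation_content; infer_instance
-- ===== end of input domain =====

-- B replaces A's split on the three-character delimiter "\n- " (around sentinel newlines)
-- by a single pass over the lines of the stripped content; same return value, no speed claim.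

-- ===== PORT A =====
def parse_translation_content (content : String) : List String :=
  let content := if PySem.Str.startswith content "```" then PySem.Str.slice content (some 3) none else content
  let content := if PySem.Str.endswith content "```" then PySem.Str.slice content none (some (-3)) else content
  let content := PySem.Str.strip content
  let content := "\n" ++ content ++ "\n"
  let translations := PySem.Chars.splitOn content.toList "\n- ".toList
  (translations.filter (fun t => PySem.Chars.strip t ≠ [])).map
    (fun t => String.ofList (PySem.Chars.strip t))

-- ===== PORT B =====
-- one fold step of Source B's loop over the lines
def pvStep (st : List (List Char) × List Char) (line : List Char) :
    List (List Char) × List Char :=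
  if PySem.Chars.startswith line "- ".toList then
    (st.1 ++ [st.2], PySem.Chars.slice line (some 2) none)
  else
    (st.1, st.2 ++ '\n' :: line)

def parse_translation_content_alt (content : String) : List String :=
  let content := if PySem.Str.startswith content "```" then PySem.Str.slice content (some 3) none else content
  let content := if PySem.Str.endswith content "```" then PySem.Str.slice content none (some (-3)) else content
  let content := PySem.Str.strip content
  let st := (PySem.Chars.splitOn content.toList "\n".toList).foldl pvStep ([], [])
  let results := st.1 ++ [st.2]
  (results.filter (fun t => PySem.Chars.strip t ≠ [])).map
    (fun t => String.ofList (PySem.Chars.strip t))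

-- ===== PRECONDITION & SPEC =====
def Spec_parse_translation_content (content : String) (out : List String) : Prop := out = parse_translation_content_alt content
instance (content : String) (out : List String) : Decidable (Spec_parse_translation_content content out) := by unfold Spec_parse_translation_content; infer_instance

-- ===== CLAIM (what is proved, stated in full; the proofs are below) =====
def Claim_equal_parse_translation_content : Prop := ∀ (content : String), Dom_parse_translation_content content → Spec_parse_translation_content content (parse_translation_content content)

-- ===== LEMMAS AND PROOFS =====

-- structural (fuel-free) version of PySem.Chars.splitOn
def splF (sep : List Char) (l : List Char) : List (List Char) :=
  match l with
  | [] => [[]]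
  | c :: rest =>
    if sep.isPrefixOf (c :: rest) ∧ sep ≠ [] then
      [] :: splF sep (rest.drop (sep.length - 1))
    else (splF sep rest).modifyHead (c :: ·)
termination_by l.length
decreasing_by
  · simp only [List.length_cons, List.length_drop]
    omega
  · simp

lemma splF_ne_nil (sep l) : splF sep l ≠ [] := by
  induction l using splF.induct sep with
  | case1 => simp [splF]
  | case2 c rest h ih => rw [splF, if_pos h]; simp
  | case3 c rest h ih =>
    rw [splF, if_neg h]
    cases hs : splF sep rest
    · exact absurd hs ih
    · simp [List.modifyHead]

lemma modifyHead_modifyHead {α} (f g : α → α) (l : List α) :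
    (l.modifyHead g).modifyHead f = l.modifyHead (f ∘ g) := by
  cases l <;> simp [List.modifyHead]

lemma modifyHead_id' {α} (f : α → α) (h : ∀ x, f x = x) (l : List α) :
    l.modifyHead f = l := by
  cases l <;> simp [List.modifyHead, h]

lemma splitOn_go_eq (sep : List Char) (hsep : sep ≠ []) :
    ∀ (fuel : Nat) (l cur : List Char) (acc : List (List Char)), l.length ≤ fuel →
      PySem.Chars.splitOn.go sep fuel l cur acc =
        acc.reverse ++ (splF sep l).modifyHead (cur.reverse ++ ·) := by
  intro fuel
  induction fuel with
  | zero =>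
    intro l cur acc hl
    have : l = [] := by cases l <;> simp_all
    subst this
    simp [PySem.Chars.splitOn.go, splF, List.modifyHead]
  | succ fuel ih =>
    intro l cur acc hl
    match l with
    | [] => simp [PySem.Chars.splitOn.go, splF, List.modifyHead]
    | c :: rest =>
      rw [PySem.Chars.splitOn.go]
      by_cases hp : sep.isPrefixOf (c :: rest)
      · rw [if_pos hp]
        have hdrop : (List.drop sep.length (c :: rest)).length ≤ fuel := by
          have hs : 1 ≤ sep.length := by cases sep <;> simp_all
          simp only [List.length_drop, List.length_cons] at *
          omega
        rw [ih _ _ _ hdrop]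
        have hsplF : splF sep (c :: rest) = [] :: splF sep (rest.drop (sep.length - 1)) := by
          rw [splF]; rw [if_pos ⟨hp, hsep⟩]
        have hd : List.drop sep.length (c :: rest) = rest.drop (sep.length - 1) := by
          cases sep with
          | nil => exact absurd rfl hsep
          | cons a as => simp [List.drop_succ_cons]
        rw [hd, hsplF]
        simp only [List.modifyHead, List.nil_append, List.cons_append, List.reverse_cons,
          List.append_assoc]
        cases hs : splF sep (List.drop (sep.length - 1) rest)
        · exact absurd hs (splF_ne_nil _ _)
        · simp
      · rw [if_neg hp]
        rw [ih _ _ _ (by simpa using Nat.le_of_succ_le_succ (by simpa using hl))]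
        have hsplF : splF sep (c :: rest) = (splF sep rest).modifyHead (c :: ·) := by
          rw [splF]; rw [if_neg (by simp [hp])]
        rw [hsplF, modifyHead_modifyHead]
        congr 1
        apply congrFun
        congr 1
        funext x
        simp

lemma splitOn_eq_splF (l sep : List Char) (hsep : sep ≠ []) :
    PySem.Chars.splitOn l sep = splF sep l := by
  unfold PySem.Chars.splitOn
  rw [splitOn_go_eq sep hsep (l.length + 1) l [] [] (by omega)]
  simp [modifyHead_id']

-- regrouping of the "\n"-split that mirrors splitting on "\n- "
def glue (ls : List (List Char)) : List (List Char) :=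
  match ls with
  | [] => []
  | [l] => [l]
  | l :: l' :: rest =>
    if ['-', ' '].isPrefixOf l' then
      l :: (glue (l' :: rest)).modifyHead (List.drop 2)
    else glue ((l ++ '\n' :: l') :: rest)
termination_by ls.length

-- the list of items produced by Source B's loop, functionally
def pvParts (cur : List Char) (ls : List (List Char)) : List (List Char) :=
  match ls with
  | [] => [cur]
  | l :: rest =>
    if ['-', ' '].isPrefixOf l then cur :: pvParts (l.drop 2) rest
    else pvParts (cur ++ '\n' :: l) rest

lemma modifyHead_append_left {α} (f : α → α) (X Y : List α) (h : X ≠ []) :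
    (X ++ Y).modifyHead f = X.modifyHead f ++ Y := by
  cases X with
  | nil => exact absurd rfl h
  | cons a t => simp [List.modifyHead]

lemma pvParts_prepend (x : List Char) :
    ∀ (ls : List (List Char)) (b : List Char),
      pvParts (x ++ b) ls = (pvParts b ls).modifyHead (x ++ ·) := by
  intro ls
  induction ls with
  | nil => intro b; simp [pvParts, List.modifyHead]
  | cons l rest ih =>
    intro b
    rw [pvParts, pvParts]
    split
    · simp [List.modifyHead]
    · rw [List.append_assoc]
      exact ih (b ++ '\n' :: l)

lemma glue_prepend (x : List Char) :
    ∀ (t : List (List Char)) (h : List Char),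
      glue ((x ++ h) :: t) = (glue (h :: t)).modifyHead (x ++ ·) := by
  intro t
  induction t with
  | nil => intro h; simp [glue, List.modifyHead]
  | cons l' rest ih =>
    intro h
    rw [glue, glue]
    split
    · simp [List.modifyHead]
    · rw [List.append_assoc]
      exact ih (h ++ '\n' :: l')

lemma glue_eq_pvParts : ∀ (ls : List (List Char)) (cur : List Char),
    glue (cur :: ls) = pvParts cur ls := by
  intro ls
  induction ls with
  | nil => intro cur; simp [glue, pvParts]
  | cons l rest ih =>
    intro cur
    by_cases hp : ['-', ' '] <+: l
    · obtain ⟨m, rfl⟩ := hp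
      rw [glue, if_pos (by simp [List.isPrefixOf_iff_prefix]),
        pvParts, if_pos (by simp [List.isPrefixOf_iff_prefix])]
      rw [ih, pvParts_prepend, modifyHead_modifyHead,
        modifyHead_id' _ (fun y => by simp)]
      simp
    · rw [glue, if_neg (by simp [List.isPrefixOf_iff_prefix, hp]),
        pvParts, if_neg (by simp [List.isPrefixOf_iff_prefix, hp])]
      exact ih (cur ++ '\n' :: l)

lemma splF1_head (u : List Char) :
    ∃ t, splF ['\n'] u = (u.takeWhile (· ≠ '\n')) :: t := by
  induction u with
  | nil => exact ⟨[], by simp [splF]⟩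
  | cons c rest ih =>
    by_cases hc : c = '\n'
    · subst hc
      refine ⟨splF ['\n'] rest, ?_⟩
      rw [splF, if_pos (by simp [List.isPrefixOf_iff_prefix])]
      simp [List.takeWhile]
    · obtain ⟨t, ht⟩ := ih
      refine ⟨t, ?_⟩
      rw [splF, if_neg (by simp [List.isPrefixOf_iff_prefix, List.cons_prefix_cons]; intro h; exact absurd h.symm hc)]
      rw [ht]
      simp [List.takeWhile, hc, List.modifyHead]

lemma prefix_takeWhile_iff (xs : List Char) (p : Char → Bool) (hxs : ∀ c ∈ xs, p c) :
    ∀ (l : List Char), (xs <+: l.takeWhile p) ↔ (xs <+: l) := by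
  induction xs with
  | nil => intro l; simp
  | cons x xs' ih =>
    intro l
    cases l with
    | nil => simp [List.takeWhile]
    | cons a l' =>
      by_cases hpa : p a
      · rw [List.takeWhile_cons_of_pos hpa]
        rw [List.cons_prefix_cons, List.cons_prefix_cons]
        constructor
        · rintro ⟨rfl, h⟩; exact ⟨rfl, (ih (fun c hc => hxs c (by simp [hc])) l').1 h⟩
        · rintro ⟨rfl, h⟩; exact ⟨rfl, (ih (fun c hc => hxs c (by simp [hc])) l').2 h⟩
      · rw [List.takeWhile_cons_of_neg hpa]
        simp only [List.prefix_nil, List.cons_prefix_cons]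
        constructor
        · intro h; simp at h
        · rintro ⟨rfl, -⟩; exact absurd (hxs x (by simp)) hpa

lemma splF1_cons_newline (u : List Char) :
    splF ['\n'] ('\n' :: u) = [] :: splF ['\n'] u := by
  rw [splF, if_pos (by simp [List.isPrefixOf_iff_prefix])]
  simp

lemma splF1_append_newline : ∀ (t : List Char),
    splF ['\n'] (t ++ ['\n']) = splF ['\n'] t ++ [[]] := by
  intro t
  induction t with
  | nil =>
    rw [List.nil_append]
    rw [splF1_cons_newline]
    simp [splF]
  | cons c rest ih =>
    by_cases hc : c = '\n'
    · subst hc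
      rw [List.cons_append, splF1_cons_newline, splF1_cons_newline, ih]
      simp
    · rw [List.cons_append]
      rw [splF, if_neg (by simp [List.isPrefixOf_iff_prefix, List.cons_prefix_cons]; intro h; exact absurd h.symm hc)]
      rw [splF, if_neg (by simp [List.isPrefixOf_iff_prefix, List.cons_prefix_cons]; intro h; exact absurd h.symm hc)]
      rw [ih, modifyHead_append_left _ _ _ (splF_ne_nil _ _)]

-- the regrouping theorem: splitting on "\n- " is the glue of the line split
lemma splF3_eq_glue_aux : ∀ (n : Nat) (u : List Char), u.length ≤ n →
    splF ['\n', '-', ' '] u = glue (splF ['\n'] u) := by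
  intro n
  induction n with
  | zero =>
    intro u hu
    have : u = [] := by cases u <;> simp_all
    subst this
    simp [splF, glue]
  | succ n ih =>
    intro u hu
    match u with
    | [] => simp [splF, glue]
    | c :: rest =>
      by_cases h3 : ['\n', '-', ' '] <+: (c :: rest)
      · obtain ⟨v, hv⟩ := h3
        simp only [List.cons_append, List.nil_append] at hv
        injection hv with e1 e2
        subst e1
        subst e2
        -- u = '\n' :: '-' :: ' ' :: v
        rw [splF, if_pos ⟨by simp [List.isPrefixOf_iff_prefix], by simp⟩]
        rw [splF1_cons_newline]
        rw [splF, if_neg (by simp [List.isPrefixOf_iff_prefix, List.cons_prefix_cons])]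
        rw [splF, if_neg (by simp [List.isPrefixOf_iff_prefix, List.cons_prefix_cons])]
        obtain ⟨h, t, hht⟩ : ∃ h t, splF ['\n'] v = h :: t := by
          cases hsv : splF ['\n'] v
          · exact absurd hsv (splF_ne_nil _ _)
          · exact ⟨_, _, rfl⟩
        rw [hht]
        simp only [List.modifyHead]
        rw [glue, if_pos (by simp [List.isPrefixOf_iff_prefix, List.cons_prefix_cons])]
        have : ('-' :: ' ' :: h) = ['-', ' '] ++ h := by simp
        rw [this, glue_prepend, modifyHead_modifyHead,
          modifyHead_id' _ (fun y => by simp)]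
        have hlen : v.length ≤ n := by simp at hu; omega
        rw [← hht, ← ih v hlen]
        have : (List.drop (['\n', '-', ' '].length - 1) ('-' :: ' ' :: v)) = v := by simp
        rw [this]
      · by_cases hc : c = '\n'
        · subst hc
          have hr : ¬ ['-', ' '] <+: rest := by
            intro hp
            obtain ⟨w, hw⟩ := hp
            exact h3 ⟨w, by simp [← hw]⟩
          rw [splF, if_neg (by
            intro hcon
            exact h3 (by simpa [List.isPrefixOf_iff_prefix] using hcon.1))]
          rw [splF1_cons_newline]
          obtain ⟨t, ht⟩ := splF1_head rest
          rw [ht]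
          rw [glue, if_neg (by
            simp only [List.isPrefixOf_iff_prefix]
            rw [prefix_takeWhile_iff ['-', ' '] (fun x => decide (x ≠ '\n')) (by intro c hc; simp at hc; rcases hc with rfl | rfl <;> decide) rest]
            exact hr)]
          have h1 : ([] ++ '\n' :: rest.takeWhile (· ≠ '\n')) = ['\n'] ++ rest.takeWhile (· ≠ '\n') := by simp
          rw [h1, glue_prepend, ← ht]
          have hlen : rest.length ≤ n := by simp at hu; omega
          rw [← ih rest hlen]
          rfl
        · rw [splF, if_neg (by
            intro hcon
            exact h3 (by simpa [List.isPrefixOf_iff_prefix] using hcon.1))]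
          rw [splF, if_neg (by
            simp [List.cons_prefix_cons]
            intro h
            exact absurd h.symm hc)]
          obtain ⟨h, t, hht⟩ : ∃ h t, splF ['\n'] rest = h :: t := by
            cases hsv : splF ['\n'] rest
            · exact absurd hsv (splF_ne_nil _ _)
            · exact ⟨_, _, rfl⟩
          rw [hht]
          simp only [List.modifyHead]
          have h1 : (c :: h) = [c] ++ h := by simp
          rw [h1, glue_prepend, ← hht]
          have hlen : rest.length ≤ n := by simp at hu; omega
          rw [← ih rest hlen]
          rfl

lemma strip_append_newline (x : List Char) :
    PySem.Chars.strip (x ++ ['\n']) = PySem.Chars.strip x := by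
  unfold PySem.Chars.strip PySem.Chars.lstrip PySem.Chars.rstrip
  rw [List.dropWhile_append]
  split
  · next h =>
    have hx : List.dropWhile PySem.Chars.isspace x = [] := by
      simpa [List.isEmpty_iff] using h
    rw [hx]
    rw [List.dropWhile_cons_of_pos (by decide), List.dropWhile_nil]
  · rw [List.reverse_append]
    simp only [List.reverse_cons, List.reverse_nil, List.nil_append, List.singleton_append]
    rw [List.dropWhile_cons_of_pos (by decide)]

-- the common final comprehension of both ports
def pvClean (P : List (List Char)) : List String :=
  (P.filter (fun t => PySem.Chars.strip t ≠ [])).map (fun t => String.ofList (PySem.Chars.strip t))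

lemma pvClean_cons (a : List Char) (P : List (List Char)) :
    pvClean (a :: P) =
      (if PySem.Chars.strip a ≠ [] then [String.ofList (PySem.Chars.strip a)] else []) ++ pvClean P := by
  by_cases h : PySem.Chars.strip a = [] <;> simp [pvClean, List.filter_cons, h]

lemma pvClean_trailnil : ∀ (ls : List (List Char)) (cur : List Char),
    pvClean (pvParts cur (ls ++ [[]])) = pvClean (pvParts cur ls) := by
  intro ls
  induction ls with
  | nil =>
    intro cur
    have h1 : pvParts cur [[]] = [cur ++ ['\n']] := by
      rw [pvParts, if_neg (by simp), pvParts]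
    have h2 : pvParts cur [] = [cur] := by rw [pvParts]
    rw [List.nil_append, h1, h2]
    by_cases h : PySem.Chars.strip cur = [] <;>
      simp [pvClean, List.filter, List.map, strip_append_newline, h]
  | cons l rest ih =>
    intro cur
    rw [List.cons_append]
    by_cases hp : ['-', ' '] <+: l
    · rw [pvParts, if_pos (by simp [List.isPrefixOf_iff_prefix, hp]),
        pvParts, if_pos (by simp [List.isPrefixOf_iff_prefix, hp])]
      rw [pvClean_cons, pvClean_cons, ih]
    · rw [pvParts, if_neg (by simp [List.isPrefixOf_iff_prefix, hp]),
        pvParts, if_neg (by simp [List.isPrefixOf_iff_prefix, hp])]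
      exact ih _

lemma dash_toList : "- ".toList = ['-', ' '] := by decide

lemma pvStep_pos (st : List (List Char) × List Char) (l : List Char) (hp : ['-', ' '] <+: l) :
    pvStep st l = (st.1 ++ [st.2], l.drop 2) := by
  unfold pvStep
  rw [if_pos (by rw [PySem.Chars.startswith_iff, dash_toList]; exact hp)]
  have : PySem.Chars.slice l (some 2) none = l.drop 2 := by
    rw [PySem.Chars.slice_eq_listSlice]
    rw [show ((2 : Int)) = ((2 : Nat) : Int) by norm_num, PySem.List.slice_from_natCast]
  rw [this]

lemma pvStep_neg (st : List (List Char) × List Char) (l : List Char) (hp : ¬ ['-', ' '] <+: l) :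
    pvStep st l = (st.1, st.2 ++ '\n' :: l) := by
  unfold pvStep
  rw [if_neg (by rw [PySem.Chars.startswith_iff, dash_toList]; exact hp)]

lemma foldl_pvStep_eq : ∀ (ls : List (List Char)) (res : List (List Char)) (cur : List Char),
    (ls.foldl pvStep (res, cur)).1 ++ [(ls.foldl pvStep (res, cur)).2] = res ++ pvParts cur ls := by
  intro ls
  induction ls with
  | nil => intro res cur; simp [pvParts]
  | cons l rest ih =>
    intro res cur
    rw [List.foldl_cons]
    by_cases hp : ['-', ' '] <+: l
    · rw [pvStep_pos _ _ hp, ih, pvParts, if_pos (by simp [List.isPrefixOf_iff_prefix, hp])]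
      simp
    · rw [pvStep_neg _ _ hp, ih, pvParts, if_neg (by simp [List.isPrefixOf_iff_prefix, hp])]

theorem parse_translation_content_spec : Claim_equal_parse_translation_content := by
  unfold Claim_equal_parse_translation_content Spec_parse_translation_content
  intro content _
  simp only [parse_translation_content, parse_translation_content_alt]
  generalize PySem.Str.strip _ = s
  show pvClean _ = pvClean _
  have hA : ("\n" ++ s ++ "\n").toList = '\n' :: s.toList ++ ['\n'] := by
    simp [String.toList_append]
  rw [hA]
  generalize s.toList = u
  rw [show ("\n- ".toList) = ['\n', '-', ' '] from by decide,
    show ("\n".toList) = ['\n'] from by decide]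
  rw [splitOn_eq_splF _ _ (by simp), splitOn_eq_splF _ _ (by simp)]
  rw [splF3_eq_glue_aux (('\n' :: u ++ ['\n']).length) _ le_rfl]
  rw [List.cons_append, splF1_cons_newline, splF1_append_newline, glue_eq_pvParts]
  rw [foldl_pvStep_eq, List.nil_append, pvClean_trailnil]
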